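-- pv_equiv track=rewrite | github.com/pronad1/Python-Library | AI/first order logic.py | compress_sentences
-- ===== SOURCE A (Python) =====
-- def compress_sentences(sentences):
--     # Split all into word lists
--     word_lists = [s.split() for s in sentences]
--
--     # Find common starting words
--     prefix = []
--     for words in zip(*word_lists):
--         if len(set(words)) == 1:  # all match
--             prefix.append(words[0])
--         else:
--             break
--
--     # If no common prefix, join with " and "
--     if not prefix:
--         return " or ".join(sentences)
--
--     # Build compressed sentence
--     differences = [" ".join(w[len(prefix):]) for w in word_lists]
--     return " ".join(prefix) + " " + " or ".join(differences)
-- ===== SOURCE B (Python) =====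
-- def compress_sentences(sentences):
--     # Same output-building as the original; the common word prefix is found by a
--     # row-wise fold (truncate a running candidate against each sentence) instead
--     # of a column-wise zip over all sentences at once.
--     word_lists = [s.split() for s in sentences]
--     if word_lists:
--         prefix = list(word_lists[0])
--         for words in word_lists[1:]:
--             i = 0
--             while i < len(prefix) and i < len(words) and prefix[i] == words[i]:
--                 i += 1
--             del prefix[i:]
--     else:
--         prefix = []
--     if not prefix:
--         return " or ".join(sentences)
--     differences = [" ".join(w[len(prefix):]) for w in word_lists]
--     return " ".join(prefix) + " " + " or ".join(differences)
-- ===== Notes on version B (the rewrite author's own statement) =====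
-- stated objective: alternative
-- what changed: The common word prefix is computed by a row-wise fold that truncates a running candidate (initialized to the first sentence's words) against each remaining sentence, instead of A's column-wise zip over all word lists with a set-cardinality test per column; the output-building is unchanged.
import Mathlib
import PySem

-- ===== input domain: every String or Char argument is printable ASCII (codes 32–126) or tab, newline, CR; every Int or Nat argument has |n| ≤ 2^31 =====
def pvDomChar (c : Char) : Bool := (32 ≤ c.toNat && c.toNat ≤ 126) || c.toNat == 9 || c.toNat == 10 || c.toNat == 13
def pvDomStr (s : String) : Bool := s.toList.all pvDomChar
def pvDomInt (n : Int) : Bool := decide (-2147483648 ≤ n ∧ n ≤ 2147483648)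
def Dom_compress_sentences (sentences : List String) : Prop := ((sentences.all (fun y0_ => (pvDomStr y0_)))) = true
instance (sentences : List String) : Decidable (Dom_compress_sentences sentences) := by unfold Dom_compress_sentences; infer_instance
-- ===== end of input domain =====

-- B computes the common word pfx by a row-wise fold truncating a candidate,
-- instead of A's column-wise zip with a set-cardinality test; same output building.

-- ===== PORT A =====
-- columns of Python's zip(*word_lists) (zip of zero iterables yields nothing)
def pvZipGo (w0 : List String) (rest : List (List String)) : List (List String) :=
  match w0 with
  | [] => []
  | x :: xs =>
    if rest.all (fun l => !l.isEmpty) then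
      (x :: rest.map (fun l => l.headD "")) :: pvZipGo xs (rest.map List.tail)
    else []

def pvZipStar : List (List String) → List (List String)
  | [] => []
  | w0 :: rest => pvZipGo w0 rest

-- the 'for words in zip(...): if len(set(words)) == 1: append else break' loop
def pvPrefLoop : List (List String) → List String
  | [] => []
  | ws :: cols =>
    if PySem.Set.len (PySem.Set.ofList ws) == 1 then ws.headD "" :: pvPrefLoop cols
    else []

def compress_sentences (sentences : List String) : String :=
  let word_lists := sentences.map PySem.Str.split₀
  let pfx := pvPrefLoop (pvZipStar word_lists)
  if pfx.isEmpty then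
    PySem.Str.join " or " sentences
  else
    let differences := word_lists.map
      (fun w => PySem.Str.join " " (PySem.List.slice w (some (PySem.List.len pfx)) none))
    PySem.Str.join " " pfx ++ " " ++ PySem.Str.join " or " differences

-- ===== PORT B =====
-- the inner while loop of B: truncate the candidate to the matching pfx of the two lists
def pvCommon2 : List String → List String → List String
  | x :: xs, y :: ys => if x == y then x :: pvCommon2 xs ys else []
  | _, _ => []

-- B's fold: candidate = first word list, truncated against each remaining one
def pvFoldPrefix : List (List String) → List String
  | [] => []
  | w0 :: rest => rest.foldl pvCommon2 w0

def compress_sentences_alt (sentences : List String) : String :=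
  let word_lists := sentences.map PySem.Str.split₀
  let pfx := pvFoldPrefix word_lists
  if pfx.isEmpty then
    PySem.Str.join " or " sentences
  else
    let differences := word_lists.map
      (fun w => PySem.Str.join " " (PySem.List.slice w (some (PySem.List.len pfx)) none))
    PySem.Str.join " " pfx ++ " " ++ PySem.Str.join " or " differences

-- ===== PRECONDITION & SPEC =====
def Spec_compress_sentences (sentences : List String) (out : String) : Prop := out = compress_sentences_alt sentences
instance (sentences : List String) (out : String) : Decidable (Spec_compress_sentences sentences out) := by unfold Spec_compress_sentences; infer_instance

-- ===== CLAIM (what is proved, stated in full; the proofs are below) =====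
def Claim_equal_compress_sentences : Prop := ∀ (sentences : List String), Dom_compress_sentences sentences → Spec_compress_sentences sentences (compress_sentences sentences)

-- ===== LEMMAS AND PROOFS =====

-- len(set(x :: t)) == 1 iff every element of t equals x
lemma pv_foldl_add_all_eq (x : String) (t : List String)
    (h : t.all (fun y => y == x) = true) : t.foldl PySem.Set.add [x] = [x] := by
  induction t with
  | nil => rfl
  | cons y ys ih =>
    simp only [List.all_cons, Bool.and_eq_true, beq_iff_eq] at h
    obtain ⟨rfl, h2⟩ := h
    simpa [PySem.Set.add, PySem.Set.contains] using ih (by simpa using h2)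

lemma pv_ofList_all_eq (x : String) (t : List String)
    (h : t.all (fun y => y == x) = true) : PySem.Set.ofList (x :: t) = [x] := by
  have : PySem.Set.ofList (x :: t) = t.foldl PySem.Set.add [x] := by
    simp [PySem.Set.ofList, PySem.Set.add, PySem.Set.contains, PySem.Set.empty]
  rw [this, pv_foldl_add_all_eq x t h]

lemma pv_setlen_one (x : String) (t : List String) :
    (PySem.Set.len (PySem.Set.ofList (x :: t)) == 1) = t.all (fun y => y == x) := by
  by_cases h : t.all (fun y => y == x) = true
  · simp [h, pv_ofList_all_eq x t h, PySem.Set.len]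
  · simp only [h]
    obtain ⟨y, hy, hyx⟩ : ∃ y ∈ t, ¬ (y == x) = true := by
      simpa [List.all_eq_true] using h
    have hne : y ≠ x := by simpa using hyx
    have hlen : (PySem.Set.ofList (x :: t)).length ≠ 1 := by
      intro h1
      obtain ⟨a, ha⟩ := List.length_eq_one_iff.mp h1
      have hx : x ∈ PySem.Set.ofList (x :: t) := by
        rw [PySem.Set.mem_ofList]; exact List.mem_cons_self ..
      have hy' : y ∈ PySem.Set.ofList (x :: t) := by
        rw [PySem.Set.mem_ofList]; exact List.mem_cons_of_mem _ hy
      rw [ha] at hx hy'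
      simp only [List.mem_singleton] at hx hy'
      exact hne (hy'.trans hx.symm)
    simp only [PySem.Set.len, beq_eq_false_iff_ne, ne_eq]
    intro hc
    exact hlen (by exact_mod_cast hc)

-- single word list: the prefix loop returns it whole
lemma pv_prefLoop_nil_rest (w0 : List String) : pvPrefLoop (pvZipGo w0 []) = w0 := by
  induction w0 with
  | nil => rfl
  | cons x xs ih =>
    simp [pvZipGo, pvPrefLoop, pv_ofList_all_eq x [] rfl, PySem.Set.len, ih]

-- peel the first remaining word list off the column scan
lemma pv_peel (w0 : List String) (r : List String) (rs : List (List String)) :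
    pvPrefLoop (pvZipGo w0 (r :: rs)) = pvCommon2 w0 (pvPrefLoop (pvZipGo r rs)) := by
  induction w0 generalizing r rs with
  | nil => cases pvPrefLoop (pvZipGo r rs) <;> simp [pvZipGo, pvPrefLoop, pvCommon2]
  | cons x xs ih =>
    cases r with
    | nil => simp [pvZipGo, pvPrefLoop, pvCommon2]
    | cons y yt =>
      by_cases h : rs.all (fun l => !l.isEmpty) = true
      · simp only [pvZipGo, pvPrefLoop, List.all_cons, List.map_cons, List.headD_cons,
          List.isEmpty_cons, Bool.not_false, Bool.true_and, h, if_true, List.tail_cons,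
          pv_setlen_one]
        by_cases hxy : y = x
        · subst hxy
          simp [ih]
          split_ifs <;> simp [pvCommon2]
        · simp [hxy]
          split_ifs <;> simp [pvCommon2, Ne.symm hxy]
      · have h2 : (rs.all fun l => !l.isEmpty) = false := by simpa using h
        simp [pvZipGo, pvPrefLoop, pvCommon2, h2]

lemma pv_common2_assoc (a b c : List String) :
    pvCommon2 (pvCommon2 a b) c = pvCommon2 a (pvCommon2 b c) := by
  induction a generalizing b c with
  | nil => simp [pvCommon2]
  | cons x xs ih =>
    cases b with
    | nil => simp [pvCommon2]
    | cons y ys =>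
      cases c with
      | nil => by_cases hxy : x = y <;> simp [pvCommon2, hxy]
      | cons z zs =>
        by_cases hxy : x = y <;> by_cases hyz : y = z <;>
          simp_all [pvCommon2]

lemma pv_common2_foldl (rs : List (List String)) (w0 r : List String) :
    pvCommon2 w0 (rs.foldl pvCommon2 r) = rs.foldl pvCommon2 (pvCommon2 w0 r) := by
  induction rs generalizing r w0 with
  | nil => rfl
  | cons a as ih => simp only [List.foldl_cons, ih, pv_common2_assoc]

lemma pv_main (w0 : List String) (rest : List (List String)) :
    pvPrefLoop (pvZipGo w0 rest) = rest.foldl pvCommon2 w0 := by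
  induction rest generalizing w0 with
  | nil => exact pv_prefLoop_nil_rest w0
  | cons r rs ih => rw [pv_peel, ih, pv_common2_foldl]; rfl

lemma pv_prefix_eq (wls : List (List String)) :
    pvPrefLoop (pvZipStar wls) = pvFoldPrefix wls := by
  cases wls with
  | nil => rfl
  | cons w0 rest => simpa [pvZipStar, pvFoldPrefix] using pv_main w0 rest

-- ===== VERDICT (by name: the statement is the Claim_ definition above) =====
theorem compress_sentences_spec : Claim_equal_compress_sentences := by
  intro sentences _
  unfold Spec_compress_sentences compress_sentences compress_sentences_alt
  simp only [pv_prefix_eq]
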